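-- pv_equiv track=rewrite | github.com/emarberg/stable-grothendieck | tests/test_peaks.py | reduce_to_big_multipermutation
-- ===== SOURCE A (Python) =====
-- def reduce_to_big_multipermutation(osp):
--     for part in osp:
--         for i in range(len(part) - 1):
--             if part[i + 1] - part[i] == 1:
--                 p = part[i + 1]
--                 osp = tuple(tuple(j if j < p else j - 1 for j in q if j != p) for q in osp)
--                 osp = tuple(q for q in osp if q)
--                 osp, length = reduce_to_big_multipermutation(osp)
--                 return osp, length + 1
--     return osp, 0
-- ===== SOURCE B (Python) =====
-- def _first_collapse(osp):
--     for part in osp: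
--         for a, b in zip(part, part[1:]):
--             if b - a == 1:
--                 return b
--     return None
--
-- def reduce_to_big_multipermutation(osp):
--     length = 0
--     while True:
--         p = _first_collapse(osp)
--         if p is None:
--             return osp, length
--         new = []
--         for q in osp:
--             t = tuple(j - (j >= p) for j in q if j != p)
--             if t:
--                 new.append(t)
--         osp = tuple(new)
--         length += 1
-- ===== Notes on version B (the rewrite author's own statement) =====
-- stated objective: alternative
-- what changed: Replaces the recursion-with-restart by an explicit while-loop with a length accumulator, a separate zip-based adjacent-pair finder helper, and a single-pass rebuild that relabels with boolean arithmetic (j - (j >= p)) and drops empty parts in the same loop.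
import Mathlib
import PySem

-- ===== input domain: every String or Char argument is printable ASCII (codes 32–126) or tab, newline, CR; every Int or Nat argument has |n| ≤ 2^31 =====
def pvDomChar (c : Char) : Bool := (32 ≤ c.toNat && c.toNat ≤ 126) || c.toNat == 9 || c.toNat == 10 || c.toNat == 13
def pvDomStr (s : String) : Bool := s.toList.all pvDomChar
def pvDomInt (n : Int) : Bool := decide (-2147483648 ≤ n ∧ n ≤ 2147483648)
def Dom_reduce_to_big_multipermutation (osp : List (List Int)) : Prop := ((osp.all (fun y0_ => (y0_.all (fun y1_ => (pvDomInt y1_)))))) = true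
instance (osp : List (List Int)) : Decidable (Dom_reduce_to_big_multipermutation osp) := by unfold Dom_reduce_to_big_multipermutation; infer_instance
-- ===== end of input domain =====

-- B is an alternative decomposition of the same computation (explicit loop with a length
-- accumulator instead of recursion); return value proved equal, no speed claim.
-- Both ports carry a fuel parameter (total element count + 1) only as a totality guard;
-- it is proved sufficient, the algorithms are their Pythons' step for step.

-- ===== PORT A =====

-- A's inner scan: 'for i in range(len(part)-1): if part[i+1]-part[i]==1: p = part[i+1]'
def pvFindPairA : List Int → Option Int
  | a :: b :: rest => if b - a = 1 then some b else pvFindPairA (b :: rest)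
  | _ => none

-- A's outer scan over parts; the first part yielding an adjacent pair wins
def pvFindA : List (List Int) → Option Int
  | [] => none
  | part :: rest =>
    match pvFindPairA part with
    | some p => some p
    | none => pvFindA rest

-- the two tuple-comprehension rebuild lines of A
def pvStepA (p : Int) (osp : List (List Int)) : List (List Int) :=
  (osp.map (fun q => (q.filter (fun j => j ≠ p)).map (fun j => if j < p then j else j - 1))).filter
    (fun q => q ≠ [])

-- total number of elements; each collapse step removes at least one, so this bounds the depth
def pvMsr (osp : List (List Int)) : Nat := (osp.map List.length).sum

-- A's recursion, fuel-guarded (fuel is a totality guard only; pvMsr osp + 1 is enough)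
def pvReduceFuelA : Nat → List (List Int) → List (List Int) × Int
  | 0, osp => (osp, 0)
  | n + 1, osp =>
    match pvFindA osp with
    | none => (osp, 0)
    | some p =>
      let r := pvReduceFuelA n (pvStepA p osp)
      (r.1, r.2 + 1)

def reduce_to_big_multipermutation (osp : List (List Int)) : List (List Int) × Int :=
  pvReduceFuelA (pvMsr osp + 1) osp

-- ===== PORT B =====

-- B's helper: zip-based adjacent-pair search
def pvFindB (osp : List (List Int)) : Option Int :=
  osp.findSome? (fun part =>
    ((part.zip part.tail).find? (fun ab => ab.2 - ab.1 == 1)).map Prod.snd)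

-- B's single-pass rebuild: relabel with j - (j >= p), keep nonempty parts
def pvStepB (p : Int) : List (List Int) → List (List Int)
  | [] => []
  | q :: rest =>
    let t := (q.filter (fun j => j ≠ p)).map (fun j => j - (if p ≤ j then 1 else 0))
    if t ≠ [] then t :: pvStepB p rest else pvStepB p rest

-- B's while-loop with the length accumulator, fuel-guarded like A's recursion
def pvLoopFuelB : Nat → List (List Int) → Int → List (List Int) × Int
  | 0, osp, length => (osp, length)
  | n + 1, osp, length =>
    match pvFindB osp with
    | none => (osp, length)
    | some p => pvLoopFuelB n (pvStepB p osp) (length + 1)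

def reduce_to_big_multipermutation_alt (osp : List (List Int)) : List (List Int) × Int :=
  pvLoopFuelB (pvMsr osp + 1) osp 0

-- ===== PRECONDITION & SPEC =====
def Spec_reduce_to_big_multipermutation (osp : List (List Int)) (out : List (List Int) × Int) : Prop := out = reduce_to_big_multipermutation_alt osp
instance (osp : List (List Int)) (out : List (List Int) × Int) : Decidable (Spec_reduce_to_big_multipermutation osp out) := by unfold Spec_reduce_to_big_multipermutation; infer_instance

-- ===== CLAIM (what is proved, stated in full; the proofs are below) =====
def Claim_equal_reduce_to_big_multipermutation : Prop := ∀ (osp : List (List Int)), Dom_reduce_to_big_multipermutation osp → Spec_reduce_to_big_multipermutation osp (reduce_to_big_multipermutation osp)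

-- ===== LEMMAS AND PROOFS =====

theorem pvFindPairA_mem {part : List Int} {p : Int} (h : pvFindPairA part = some p) : p ∈ part := by
  induction part with
  | nil => simp [pvFindPairA] at h
  | cons a rest ih =>
    match rest, ih with
    | [], _ => simp [pvFindPairA] at h
    | b :: r, ih =>
      simp only [pvFindPairA] at h
      split at h
      · cases h; simp
      · exact List.mem_cons_of_mem _ (ih h)

theorem pvMsr_step_lt {osp : List (List Int)} {p : Int} (h : pvFindA osp = some p) :
    pvMsr (pvStepA p osp) < pvMsr osp := by
  induction osp with
  | nil => simp [pvFindA] at h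
  | cons part rest ih =>
    have hle : ∀ (l : List (List Int)), pvMsr (pvStepA p l) ≤ pvMsr l := by
      intro l
      induction l with
      | nil => simp [pvStepA, pvMsr]
      | cons q r ihq =>
        simp only [pvStepA, pvMsr, List.map_cons, List.filter_cons] at *
        split
        · simp only [List.map_cons, List.sum_cons]
          have h1 : ((q.filter (fun j => j ≠ p)).map (fun j => if j < p then j else j - 1)).length ≤ q.length := by
            simpa using List.length_filter_le _ q
          omega
        · simp only [List.sum_cons]
          omega
    simp only [pvFindA] at h
    cases hfp : pvFindPairA part with
    | some p' =>
      rw [hfp] at h; cases h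
      have hmem : p ∈ part := pvFindPairA_mem hfp
      have hstrict : (part.filter (fun j => j ≠ p)).length < part.length := by
        apply List.length_filter_lt_length_iff_exists.mpr
        exact ⟨p, hmem, by simp⟩
      have hrest := hle rest
      simp only [pvStepA, pvMsr, List.map_cons, List.filter_cons] at *
      split
      · simp only [List.map_cons, List.sum_cons]
        have : ((part.filter (fun j => j ≠ p)).map (fun j => if j < p then j else j - 1)).length
            = (part.filter (fun j => j ≠ p)).length := List.length_map _
        omega
      · simp only [List.sum_cons]
        omega
    | none =>
      rw [hfp] at h
      have := ih h
      have hq : ((part.filter (fun j => j ≠ p)).map (fun j => if j < p then j else j - 1)).length ≤ part.length := by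
        simpa using List.length_filter_le _ part
      simp only [pvStepA, pvMsr, List.map_cons, List.filter_cons] at *
      split
      · simp only [List.map_cons, List.sum_cons]; omega
      · simp only [List.sum_cons]; omega

theorem pvFindB_eq (osp : List (List Int)) : pvFindB osp = pvFindA osp := by
  induction osp with
  | nil => rfl
  | cons part rest ih =>
    have hpart : ((part.zip part.tail).find? (fun ab => ab.2 - ab.1 == 1)).map Prod.snd
        = pvFindPairA part := by
      induction part with
      | nil => rfl
      | cons a r ihp =>
        match r, ihp with
        | [], _ => rfl
        | b :: r', ihp =>
          simp only [List.tail_cons, List.zip_cons_cons, List.find?, pvFindPairA]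
          by_cases hb : b - a = 1
          · simp [hb]
          · have hb' : (b - a == 1) = false := by simpa using hb
            simp only [hb', if_neg hb]
            simpa using ihp
    simp only [pvFindB, List.findSome?, pvFindA] at *
    rw [hpart]
    cases pvFindPairA part <;> simp_all

theorem pvStepB_eq (p : Int) (osp : List (List Int)) : pvStepB p osp = pvStepA p osp := by
  induction osp with
  | nil => rfl
  | cons q rest ih =>
    have hq : (q.filter (fun j => j ≠ p)).map (fun j => j - (if p ≤ j then 1 else 0))
        = (q.filter (fun j => j ≠ p)).map (fun j => if j < p then j else j - 1) := by
      apply List.map_congr_left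
      intro j _
      by_cases h : j < p
      · simp [h, show ¬ p ≤ j by omega]
      · simp [h, show p ≤ j by omega]
    have ih' : pvStepB p rest
        = (rest.map (fun q => (q.filter (fun j => j ≠ p)).map (fun j => if j < p then j else j - 1))).filter
            (fun q => q ≠ []) := by rw [ih]; rfl
    simp only [pvStepB, pvStepA, List.map_cons, List.filter_cons]
    rw [hq, ih']
    by_cases h : (q.filter (fun j => j ≠ p)).map (fun j => if j < p then j else j - 1) = []
    · simp [h]
    · simp [h]

-- the fuel is irrelevant once it exceeds the measure
theorem pvReduceFuelA_irrel : ∀ (n m : Nat) (osp : List (List Int)),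
    pvMsr osp < n → pvMsr osp < m → pvReduceFuelA n osp = pvReduceFuelA m osp := by
  intro n
  induction n with
  | zero => intro m osp hn; omega
  | succ n ih =>
    intro m osp hn hm
    match m, hm with
    | m + 1, hm =>
      simp only [pvReduceFuelA]
      cases hf : pvFindA osp with
      | none => rfl
      | some p =>
        have hlt := pvMsr_step_lt hf
        dsimp only
        rw [ih n (pvStepA p osp) (by omega) (by omega),
            ih m (pvStepA p osp) (by omega) (by omega)]

theorem pvLoopFuelB_eq : ∀ (n : Nat) (osp : List (List Int)) (len : Int), pvMsr osp < n →
    pvLoopFuelB n osp len = ((reduce_to_big_multipermutation osp).1,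
                             (reduce_to_big_multipermutation osp).2 + len) := by
  intro n
  induction n with
  | zero => intro osp len hn; omega
  | succ n ih =>
    intro osp len hn
    simp only [pvLoopFuelB, reduce_to_big_multipermutation, pvReduceFuelA, pvFindB_eq]
    cases hf : pvFindA osp with
    | none => simp
    | some p =>
      have hlt := pvMsr_step_lt hf
      dsimp only
      rw [pvStepB_eq, ih (pvStepA p osp) (len + 1) (by omega)]
      simp only [reduce_to_big_multipermutation]
      rw [pvReduceFuelA_irrel (pvMsr osp) (pvMsr (pvStepA p osp) + 1) (pvStepA p osp)
            (by omega) (by omega)]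
      simp only [Prod.mk.injEq, true_and]
      omega

-- ===== VERDICT (by name: the statement is the Claim_ definition above) =====
theorem reduce_to_big_multipermutation_spec : Claim_equal_reduce_to_big_multipermutation := by
  intro osp _
  unfold Spec_reduce_to_big_multipermutation reduce_to_big_multipermutation_alt
  rw [pvLoopFuelB_eq (pvMsr osp + 1) osp 0 (by omega)]
  simp
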